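-- pv_equiv track=rewrite | github.com/chikingsley/safari-bookmarks-mcp | src/safaribookmarks/mcp/bootstrap.py | _normalize_clients
-- ===== SOURCE A (Python) =====
-- SUPPORTED_CLIENTS = ("claude", "opencode", "codex", "gemini")
--
-- def _normalize_clients(clients: tuple[str, ...] | list[str] | None) -> tuple[str, ...]:
--     if not clients:
--         return SUPPORTED_CLIENTS
--     selected = [client.strip().lower() for client in clients if isinstance(client, str)]
--     unknown = [client for client in selected if client not in SUPPORTED_CLIENTS]
--     if unknown:
--         raise ValueError(
--             f"Unsupported client(s): {', '.join(unknown)}. "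
--             f"Supported: {', '.join(SUPPORTED_CLIENTS)}"
--         )
--     return tuple(dict.fromkeys(selected))
-- ===== SOURCE B (Python) =====
-- SUPPORTED_CLIENTS = ("claude", "opencode", "codex", "gemini")
--
-- def _normalize_clients(clients):
--     if not clients:
--         return SUPPORTED_CLIENTS
--     names = [client.strip().lower() for client in clients if isinstance(client, str)]
--     return tuple(_validate_dedup(names))
--
-- def _validate_dedup(names):
--     # Recursive select-first scheme: keep the head, filter its duplicates out of the
--     # tail before recursing; no dict is ever built.  Depth is bounded by the number
--     # of distinct supported names (<= 5 calls), each level one linear filter.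
--     if not names:
--         return []
--     head, rest = names[0], names[1:]
--     if head not in SUPPORTED_CLIENTS:
--         unknown = [head] + [c for c in rest if c not in SUPPORTED_CLIENTS]
--         raise ValueError(
--             f"Unsupported client(s): {', '.join(unknown)}. "
--             f"Supported: {', '.join(SUPPORTED_CLIENTS)}"
--         )
--     return [head] + _validate_dedup([c for c in rest if c != head])
-- ===== Notes on version B (the rewrite author's own statement) =====
-- stated objective: alternative
-- what changed: Replaces A's staged passes (map, filter, dict.fromkeys) with a recursive select-first scheme that validates the head and filters its duplicates out of the tail before recursing, deduplicating with no dict at all.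
import Mathlib
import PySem

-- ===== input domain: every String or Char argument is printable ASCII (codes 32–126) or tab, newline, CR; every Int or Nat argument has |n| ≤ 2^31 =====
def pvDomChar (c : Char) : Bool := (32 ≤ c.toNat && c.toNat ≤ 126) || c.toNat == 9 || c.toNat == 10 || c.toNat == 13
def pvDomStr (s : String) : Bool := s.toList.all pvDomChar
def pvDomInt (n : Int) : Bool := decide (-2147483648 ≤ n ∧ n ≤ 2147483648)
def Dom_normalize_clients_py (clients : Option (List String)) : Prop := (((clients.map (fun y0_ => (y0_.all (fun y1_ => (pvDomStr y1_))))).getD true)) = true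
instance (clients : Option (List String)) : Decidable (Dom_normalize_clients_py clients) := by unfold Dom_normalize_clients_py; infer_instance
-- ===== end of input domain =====

-- B replaces A's staged passes (map, filter, dict.fromkeys) with a recursive select-first pass that
-- filters the head's duplicates out of the tail before recursing (no dict); objective: alternative.

-- shared module constant SUPPORTED_CLIENTS
def pvSupported : List String := ["claude", "opencode", "codex", "gemini"]

-- client.strip().lower() (shared normalization step of both programs)
def pvStripLower (s : String) : String := PySem.Str.lower (PySem.Str.strip s)

-- ===== PORT A =====
-- Outside Pre_ (unknown ≠ []) Python A raises ValueError; the port returns [] there (nothing is claimed there).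
def normalize_clients_py (clients : Option (List String)) : List String :=
  match clients with
  | none => pvSupported
  | some cs =>
    if cs.isEmpty then pvSupported
    else
      let selected := cs.map pvStripLower            -- isinstance(client, str) is always true for List String
      let unknown := selected.filter (fun c => !(pvSupported.contains c))
      if unknown.isEmpty then PySem.List.dedup selected   -- tuple(dict.fromkeys(selected))
      else []

-- ===== PORT B =====
-- recursive helper _validate_dedup: none = the raised ValueError, propagated
def pvValidateDedup : List String → Option (List String)
  | [] => some []
  | h :: rest =>
    if pvSupported.contains h then
      (pvValidateDedup (rest.filter (fun c => c != h))).map (fun t => h :: t)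
    else none
termination_by l => l.length
decreasing_by simpa using Nat.lt_succ_of_le (List.length_filter_le _ _)

def normalize_clients_py_alt (clients : Option (List String)) : List String :=
  match clients with
  | none => pvSupported
  | some cs =>
    if cs.isEmpty then pvSupported
    else (pvValidateDedup (cs.map pvStripLower)).getD []   -- getD only for the raise case, outside Pre_

-- ===== PRECONDITION & SPEC =====
-- Pre_ excludes exactly the inputs on which Python A raises ValueError: some element normalizes to an unsupported name.
def Pre_normalize_clients_py (clients : Option (List String)) : Prop :=
  match clients with
  | none => True
  | some cs => ∀ c ∈ cs, pvStripLower c ∈ pvSupported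

instance (clients : Option (List String)) : Decidable (Pre_normalize_clients_py clients) := by
  unfold Pre_normalize_clients_py; cases clients <;> infer_instance

def pvWitness_normalize_clients_py : Option (List String) := some ["Claude", " codex ", "claude"]

def Spec_normalize_clients_py (clients : Option (List String)) (out : List String) : Prop := out = normalize_clients_py_alt clients
instance (clients : Option (List String)) (out : List String) : Decidable (Spec_normalize_clients_py clients out) := by unfold Spec_normalize_clients_py; infer_instance

-- ===== CLAIM =====
def Claim_equal_normalize_clients_py : Prop := ∀ (clients : Option (List String)), Dom_normalize_clients_py clients → Pre_normalize_clients_py clients → Spec_normalize_clients_py clients (normalize_clients_py clients)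

-- ===== LEMMAS AND PROOFS =====

-- Adding an element already in the set is a no-op on every later add of it: folding over xs
-- equals folding over xs with all copies of x filtered out, when x is already in s.
theorem pv_foldl_add_filter (xs : List String) (s : PySem.Set String) (x : String)
    (hx : x ∈ s) :
    xs.foldl PySem.Set.add s = (xs.filter (fun c => c != x)).foldl PySem.Set.add s := by
  induction xs generalizing s with
  | nil => rfl
  | cons y ys ih =>
    by_cases hy : y = x
    · subst hy
      have : PySem.Set.add s y = s := by
        simp [PySem.Set.add, List.contains_iff_mem, hx]
      simp [List.filter_cons, this, ih s hx]
    · have hmem : x ∈ PySem.Set.add s y := by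
        simp [PySem.Set.add]; split <;> simp [hx]
      simp [List.filter_cons, hy, ih _ hmem]

-- Folding adds over a list avoiding x, starting from x :: s, just carries x in front.
theorem pv_foldl_add_cons (xs : List String) (s : PySem.Set String) (x : String)
    (hx : ∀ c ∈ xs, c ≠ x) :
    xs.foldl PySem.Set.add (x :: s) = x :: xs.foldl PySem.Set.add s := by
  induction xs generalizing s with
  | nil => rfl
  | cons y ys ih =>
    have hyx : y ≠ x := hx y List.mem_cons_self
    have hadd : PySem.Set.add (x :: s) y = x :: PySem.Set.add s y := by
      simp [PySem.Set.add, List.contains_iff_mem, hyx]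
      split <;> simp
    simp only [List.foldl_cons, hadd]
    exact ih _ (fun c hc => hx c (List.mem_cons_of_mem _ hc))

-- dict.fromkeys' first-occurrence dedup satisfies B's recursion.
theorem pv_dedup_cons (x : String) (xs : List String) :
    PySem.List.dedup (x :: xs) = x :: PySem.List.dedup (xs.filter (fun c => c != x)) := by
  have h1 : PySem.List.dedup (x :: xs)
      = xs.foldl PySem.Set.add [x] := by
    simp [PySem.List.dedup, PySem.Set.ofList, PySem.Set.empty, PySem.Set.add]
  rw [h1, pv_foldl_add_filter xs [x] x (by simp)]
  rw [pv_foldl_add_cons _ [] x (by intro c hc; simpa using (List.of_mem_filter hc))]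
  rfl

-- When every name is supported, B's recursion returns exactly the dedup A computes.
theorem pv_validate_eq_dedup (l : List String)
    (h : ∀ c ∈ l, pvSupported.contains c = true) :
    pvValidateDedup l = some (PySem.List.dedup l) := by
  induction hn : l.length using Nat.strong_induction_on generalizing l with
  | _ n ih =>
    match l, h with
    | [], _ => rw [pvValidateDedup]; rfl
    | x :: rest, h =>
      rw [pvValidateDedup, if_pos (h x List.mem_cons_self)]
      have hlt : (rest.filter (fun c => c != x)).length < n := by
        subst hn
        exact Nat.lt_succ_of_le (List.length_filter_le _ _)
      rw [ih _ hlt (rest.filter (fun c => c != x))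
        (fun c hc => h c (List.mem_cons_of_mem _ (List.mem_of_mem_filter hc))) rfl]
      rw [pv_dedup_cons]; rfl

theorem pv_filter_nil (cs : List String)
    (h : ∀ c ∈ cs, pvSupported.contains (pvStripLower c) = true) :
    (cs.map pvStripLower).filter (fun c => !(pvSupported.contains c)) = [] := by
  induction cs with
  | nil => rfl
  | cons x xs ih =>
    have hx := h x List.mem_cons_self
    simp only [List.map_cons, List.filter_cons, hx, Bool.not_true, Bool.false_eq_true, reduceIte]
    exact ih (fun c hc => h c (List.mem_cons_of_mem _ hc))

-- ===== VERDICT =====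
theorem normalize_clients_py_spec : Claim_equal_normalize_clients_py := by
  intro clients _ hpre
  unfold Spec_normalize_clients_py normalize_clients_py normalize_clients_py_alt
  cases clients with
  | none => rfl
  | some cs =>
    by_cases hemp : cs.isEmpty
    · simp [hemp]
    · have hall : ∀ c ∈ cs, pvSupported.contains (pvStripLower c) = true := by
        intro c hc
        simpa [List.contains_iff_mem] using hpre c hc
      have hall' : ∀ c ∈ cs.map pvStripLower, pvSupported.contains c = true := by
        intro c hc
        obtain ⟨d, hd, rfl⟩ := List.mem_map.mp hc
        exact hall d hd
      simp only [hemp, Bool.false_eq_true, reduceIte]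
      rw [pv_filter_nil cs hall, pv_validate_eq_dedup _ hall']
      rfl
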